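-- pv_equiv track=rewrite | github.com/charlesfranciscodev/codingame | clash-of-code/fastest/revive-spongebob-meme/revive_spongebob_meme.py | revive_spongebob_meme
-- ===== SOURCE A (Python) =====
-- def revive_spongebob_meme(input_string):
--     converted_string = ""
--     i = 0
--     for char in input_string:
--         if char.isalpha():
--             if i % 2 == 0:
--                 converted_string += char.upper()
--             else:
--                 converted_string += char.lower()
--             i += 1
--         else:
--             converted_string += char
--     return converted_string
-- ===== SOURCE B (Python) =====
-- def revive_spongebob_meme(input_string):
--     letters = [c for c in input_string if c.isalpha()]
--     transformed = [c.upper() if j % 2 == 0 else c.lower() for j, c in enumerate(letters)]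
--     it = iter(transformed)
--     return "".join(next(it) if c.isalpha() else c for c in input_string)
-- ===== Notes on version B (the rewrite author's own statement) =====
-- stated objective: alternative
-- what changed: B splits the work into two passes: it extracts the alphabetic subsequence, case-transforms it by its own index parity as a separate table, and then reinterleaves that table with the non-letters of the original string, instead of A's single loop carrying a running letter counter and building the result by string concatenation.
import Mathlib
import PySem

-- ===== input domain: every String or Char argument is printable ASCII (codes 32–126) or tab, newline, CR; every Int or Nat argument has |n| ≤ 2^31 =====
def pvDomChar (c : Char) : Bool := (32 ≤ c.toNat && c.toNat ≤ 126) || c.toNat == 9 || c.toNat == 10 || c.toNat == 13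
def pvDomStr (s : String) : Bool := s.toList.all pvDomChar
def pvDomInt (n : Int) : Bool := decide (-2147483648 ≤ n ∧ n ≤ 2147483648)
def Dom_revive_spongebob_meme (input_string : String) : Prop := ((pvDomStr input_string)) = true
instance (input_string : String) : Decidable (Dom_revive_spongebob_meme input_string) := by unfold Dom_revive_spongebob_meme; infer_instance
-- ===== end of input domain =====

-- B alternates upper/lowercase on letters via two passes (extract+transform the letter subsequence, then reinterleave) instead of A's single counter-carrying loop.

-- ===== PORT A =====
-- one loop over the characters, state = (converted_string, letter counter i)
def revive_spongebob_meme (input_string : String) : String :=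
  let r := input_string.toList.foldl (fun (st : List Char × Nat) char =>
    if PySem.Chars.isalpha char then
      (st.1 ++ [if st.2 % 2 == 0 then PySem.Chars.upperChar char else PySem.Chars.lowerChar char], st.2 + 1)
    else (st.1 ++ [char], st.2)) ([], 0)
  String.mk r.1

-- ===== PORT B =====
-- letters = [c for c in input_string if c.isalpha()]; transformed built by enumerate;
-- then the reinterleaving pass consuming `transformed` one element per letter (the
-- empty-iterator branch is unreachable since `transformed` has one entry per letter).
def pvReinterleave : List Char → List Char → List Char
  | [], _ => []
  | c :: rest, ts =>
    if PySem.Chars.isalpha c then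
      match ts with
      | t :: ts' => t :: pvReinterleave rest ts'
      | [] => []
    else c :: pvReinterleave rest ts

def revive_spongebob_meme_alt (input_string : String) : String :=
  let letters := input_string.toList.filter (fun c => PySem.Chars.isalpha c)
  let transformed := (PySem.List.enumerate letters).map
    (fun jc => if jc.1 % 2 == 0 then PySem.Chars.upperChar jc.2 else PySem.Chars.lowerChar jc.2)
  String.mk (pvReinterleave input_string.toList transformed)

-- ===== PRECONDITION & SPEC =====
def Spec_revive_spongebob_meme (input_string : String) (out : String) : Prop := out = revive_spongebob_meme_alt input_string
instance (input_string : String) (out : String) : Decidable (Spec_revive_spongebob_meme input_string out) := by unfold Spec_revive_spongebob_meme; infer_instance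

-- ===== CLAIM (what is proved, stated in full; the proofs are below) =====
def Claim_equal_revive_spongebob_meme : Prop := ∀ (input_string : String), Dom_revive_spongebob_meme input_string → Spec_revive_spongebob_meme input_string (revive_spongebob_meme input_string)

-- ===== LEMMAS AND PROOFS =====

-- recursive characterization of A's loop output, letter counter i
def pvG : List Char → Nat → List Char
  | [], _ => []
  | c :: rest, i =>
    if PySem.Chars.isalpha c then
      (if i % 2 == 0 then PySem.Chars.upperChar c else PySem.Chars.lowerChar c) :: pvG rest (i + 1)
    else c :: pvG rest i

lemma pvFoldA (s : List Char) : ∀ (acc : List Char) (i : Nat),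
    (s.foldl (fun (st : List Char × Nat) char =>
      if PySem.Chars.isalpha char then
        (st.1 ++ [if st.2 % 2 == 0 then PySem.Chars.upperChar char else PySem.Chars.lowerChar char], st.2 + 1)
      else (st.1 ++ [char], st.2)) (acc, i)).1 = acc ++ pvG s i := by
  induction s with
  | nil => intro acc i; simp [pvG]
  | cons c rest ih =>
    intro acc i
    by_cases h : PySem.Chars.isalpha c = true <;>
      simp only [pvG, h, List.foldl_cons, if_true, if_false, Bool.false_eq_true, ite_false, ite_true] <;>
      rw [ih] <;> simp

-- transformed table with index starting at j
def pvTf : List Char → Int → List Char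
  | [], _ => []
  | c :: cs, j => (if j % 2 == 0 then PySem.Chars.upperChar c else PySem.Chars.lowerChar c) :: pvTf cs (j + 1)

lemma pvTf_eq (cs : List Char) : ∀ j : Int,
    (PySem.List.enumerate cs j).map
      (fun jc => if jc.1 % 2 == 0 then PySem.Chars.upperChar jc.2 else PySem.Chars.lowerChar jc.2)
      = pvTf cs j := by
  induction cs with
  | nil => intro j; simp [PySem.List.enumerate_nil, pvTf]
  | cons c rest ih =>
    intro j
    rw [PySem.List.enumerate_cons, List.map_cons, pvTf, ih (j + 1)]

lemma pvMod_cast (i : Nat) : ((i : Int) % 2 == 0) = (i % 2 == 0) := by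
  rcases Nat.even_or_odd i with ⟨k, hk⟩ | ⟨k, hk⟩ <;> subst hk <;> simp <;> omega

lemma pvInterleave_eq (s : List Char) : ∀ i : Nat,
    pvReinterleave s (pvTf (s.filter (fun c => PySem.Chars.isalpha c)) i) = pvG s i := by
  induction s with
  | nil => intro i; simp [pvReinterleave, pvG]
  | cons c rest ih =>
    intro i
    by_cases h : PySem.Chars.isalpha c = true
    · simp [pvReinterleave, pvG, h, List.filter_cons, pvTf, ih, pvMod_cast, Int.add_comm]
      have := ih (i + 1)
      simpa [Nat.cast_add] using this
    · simp [pvReinterleave, pvG, h, List.filter_cons, ih]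

-- ===== VERDICT (by name: the statement is the Claim_ definition above) =====
theorem revive_spongebob_meme_spec : Claim_equal_revive_spongebob_meme := by
  intro s _
  unfold Spec_revive_spongebob_meme revive_spongebob_meme revive_spongebob_meme_alt
  simp only [pvFoldA, List.nil_append, pvTf_eq]
  rw [show (0:Int) = ((0:Nat):Int) from rfl, pvInterleave_eq]
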